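-- pv_equiv track=rewrite | github.com/Eyjafjallaaa/HandwriteCraft | benchmark_time.py | generate_test_text
-- ===== SOURCE A (Python) =====
-- def generate_test_text(char_count):
--     """生成指定字数的测试文本"""
--     # 使用一段重复的中文文本
--     base_text = """大三学年（2024-2025学年）是大学期间承上启下，专业技能飞速提升的关键一年。
-- 在这一学年里，我始终保持着严谨求学的态度，在专业理论学习、前沿技术探索以及个人综合素质培养方面均取得了显著的进步。
-- 在思想与专业学习方面，我不仅扎实掌握了各项核心专业课程，更将极大的热情投入到了课外的技术钻研中。
-- 我深入学习了Node.js与Rust编程语言，并结合Tauri框架进行了实践探索。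
-- 同时，我对多智能体AI系统产生了浓厚的兴趣，不仅深度剖析了OpenClaw、Eigen等开源项目的底层逻辑，
-- 还亲手进行了环境配置与部署调试，极大提升了我的动手能力和系统性思维。"""
--
--     # 重复文本直到达到指定字数
--     text = ""
--     while len(text) < char_count:
--         text += base_text
--     return text[:char_count]
-- ===== SOURCE B (Python) =====
-- def generate_test_text(char_count):
--     """生成指定字数的测试文本"""
--     base_text = """大三学年（2024-2025学年）是大学期间承上启下，专业技能飞速提升的关键一年。
-- 在这一学年里，我始终保持着严谨求学的态度，在专业理论学习、前沿技术探索以及个人综合素质培养方面均取得了显著的进步。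
-- 在思想与专业学习方面，我不仅扎实掌握了各项核心专业课程，更将极大的热情投入到了课外的技术钻研中。
-- 我深入学习了Node.js与Rust编程语言，并结合Tauri框架进行了实践探索。
-- 同时，我对多智能体AI系统产生了浓厚的兴趣，不仅深度剖析了OpenClaw、Eigen等开源项目的底层逻辑，
-- 还亲手进行了环境配置与部署调试，极大提升了我的动手能力和系统性思维。"""
--     # closed form: number of whole repetitions = ceil(char_count / len(base_text)), floored at 0
--     k = max(0, -(-char_count // len(base_text)))
--     return (base_text * k)[:char_count]
-- ===== Notes on version B (the rewrite author's own statement) =====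
-- stated objective: faster
-- what changed: The while-loop that appends base_text until the length suffices is replaced by a closed-form ceiling-division repeat count k and a single multiply-and-slice (base_text * k)[:char_count].
import Mathlib
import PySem

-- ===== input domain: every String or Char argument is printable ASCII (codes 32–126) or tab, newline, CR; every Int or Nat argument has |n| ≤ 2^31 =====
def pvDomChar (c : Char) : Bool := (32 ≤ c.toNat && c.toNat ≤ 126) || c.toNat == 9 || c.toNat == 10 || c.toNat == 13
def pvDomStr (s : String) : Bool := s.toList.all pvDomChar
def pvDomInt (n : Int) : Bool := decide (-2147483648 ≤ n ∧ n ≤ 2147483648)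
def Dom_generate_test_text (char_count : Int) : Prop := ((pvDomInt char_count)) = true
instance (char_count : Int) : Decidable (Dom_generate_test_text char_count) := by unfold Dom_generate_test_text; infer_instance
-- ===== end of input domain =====

-- B replaces A's while-loop accumulation by a closed-form ceiling-division repeat count and one multiply-and-slice (objective: simpler).

-- ===== PORT A =====
-- the repeated base text (shared constant of both Python versions)
def gttBase : List Char := "大三学年（2024-2025学年）是大学期间承上启下，专业技能飞速提升的关键一年。\n在这一学年里，我始终保持着严谨求学的态度，在专业理论学习、前沿技术探索以及个人综合素质培养方面均取得了显著的进步。\n在思想与专业学习方面，我不仅扎实掌握了各项核心专业课程，更将极大的热情投入到了课外的技术钻研中。\n我深入学习了Node.js与Rust编程语言，并结合Tauri框架进行了实践探索。\n同时，我对多智能体AI系统产生了浓厚的兴趣，不仅深度剖析了OpenClaw、Eigen等开源项目的底层逻辑，\n还亲手进行了环境配置与部署调试，极大提升了我的动手能力和系统性思维。".toList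

set_option maxRecDepth 8192 in
set_option maxHeartbeats 2000000 in
theorem gttBase_pos : 0 < gttBase.length := by decide

-- the while-loop: text += base_text until len(text) >= char_count
def gttLoopA (char_count : Int) (text : List Char) : List Char :=
  if ((text.length : Int) < char_count) then gttLoopA char_count (text ++ gttBase) else text
termination_by (char_count - (text.length : Int)).toNat
decreasing_by
  have hb : 0 < gttBase.length := gttBase_pos
  simp only [List.length_append]
  omega

def generate_test_text (char_count : Int) : String :=
  String.ofList (PySem.List.slice (gttLoopA char_count []) none (some char_count))

-- ===== PORT B =====
def generate_test_text_alt (char_count : Int) : String :=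
  -- k = max(0, -(-char_count // len(base_text))), inlined into the replicate count
  String.ofList (PySem.List.slice
    ((List.replicate (max 0 (-(PySem.Int.floordiv (-char_count) (gttBase.length : Int)))).toNat gttBase).flatten)
    none (some char_count))

-- ===== PRECONDITION & SPEC =====
def Spec_generate_test_text (char_count : Int) (out : String) : Prop := out = generate_test_text_alt char_count
instance (char_count : Int) (out : String) : Decidable (Spec_generate_test_text char_count out) := by unfold Spec_generate_test_text; infer_instance

-- ===== CLAIM (what is proved, stated in full; the proofs are below) =====
def Claim_equal_generate_test_text : Prop := ∀ (char_count : Int), Dom_generate_test_text char_count → Spec_generate_test_text char_count (generate_test_text char_count)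

-- ===== LEMMAS AND PROOFS =====

theorem gttRep_len (n : Nat) : (List.replicate n gttBase).flatten.length = n * gttBase.length := by
  simp [List.length_flatten, List.map_replicate, List.sum_replicate]

theorem gttRep_succ (n : Nat) :
    (List.replicate (n + 1) gttBase).flatten = gttBase ++ (List.replicate n gttBase).flatten := by
  simp [List.replicate_succ]

theorem take_gttRep_le {t j1 j2 : Nat} (hj : j1 ≤ j2) (h1 : t ≤ j1 * gttBase.length) :
    ((List.replicate j1 gttBase).flatten).take t = ((List.replicate j2 gttBase).flatten).take t := by
  have : (List.replicate j2 gttBase).flatten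
      = (List.replicate j1 gttBase).flatten ++ (List.replicate (j2 - j1) gttBase).flatten := by
    rw [← List.flatten_append, ← List.replicate_add, Nat.add_sub_cancel' hj]
  rw [this, List.take_append_of_le_length (by rw [gttRep_len]; exact h1)]

theorem take_gttRep {t j1 j2 : Nat} (h1 : t ≤ j1 * gttBase.length) (h2 : t ≤ j2 * gttBase.length) :
    ((List.replicate j1 gttBase).flatten).take t = ((List.replicate j2 gttBase).flatten).take t := by
  rcases le_total j1 j2 with h | h
  · exact take_gttRep_le h h1
  · exact (take_gttRep_le h h2).symm

theorem gttLoopA_spec_aux (cc : Int) (m : Nat) : ∀ (text : List Char), (cc - (text.length : Int)).toNat ≤ m →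
    (∃ j, gttLoopA cc text = text ++ (List.replicate j gttBase).flatten) ∧
      cc ≤ ((gttLoopA cc text).length : Int) := by
  induction m with
  | zero =>
      intro text hm
      have hge : ¬ ((text.length : Int) < cc) := by omega
      rw [gttLoopA.eq_def, if_neg hge]
      exact ⟨⟨0, by simp⟩, by omega⟩
  | succ m ih =>
      intro text hm
      by_cases hlt : (text.length : Int) < cc
      · rw [gttLoopA.eq_def, if_pos hlt]
        have hmeas : (cc - ((text ++ gttBase).length : Int)).toNat ≤ m := by
          have hb := gttBase_pos
          simp only [List.length_append]
          omega
        obtain ⟨⟨j, hj⟩, hlen⟩ := ih (text ++ gttBase) hmeas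
        refine ⟨⟨j + 1, ?_⟩, hlen⟩
        rw [hj, gttRep_succ, ← List.append_assoc]
      · rw [gttLoopA.eq_def, if_neg hlt]
        exact ⟨⟨0, by simp⟩, by omega⟩

theorem gttLoopA_spec (cc : Int) (text : List Char) :
    (∃ j, gttLoopA cc text = text ++ (List.replicate j gttBase).flatten) ∧
      cc ≤ ((gttLoopA cc text).length : Int) :=
  gttLoopA_spec_aux cc (cc - (text.length : Int)).toNat text le_rfl

theorem slice_nil_to (b : Int) : PySem.List.slice ([] : List Char) none (some b) = [] := by
  simp [PySem.List.slice]

-- ===== VERDICT (by name: the statement is the Claim_ definition above) =====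
theorem generate_test_text_spec : Claim_equal_generate_test_text := by
  intro cc _
  unfold Spec_generate_test_text generate_test_text generate_test_text_alt
  rcases le_or_gt cc 0 with hcc | hcc
  · -- char_count ≤ 0: both strings are empty before the slice
    have hloop : gttLoopA cc [] = [] := by
      rw [gttLoopA, if_neg (by simpa using hcc.not_gt)]
    have hq : -(PySem.Int.floordiv (-cc) (gttBase.length : Int)) ≤ 0 := by
      have h0 : (0:Int) < (gttBase.length : Int) := by exact_mod_cast gttBase_pos
      have := Int.ediv_nonneg (by omega : (0:Int) ≤ -cc) (le_of_lt h0)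
      rw [PySem.Int.floordiv_eq_ediv_of_pos h0]
      omega
    have hk : (max 0 (-(PySem.Int.floordiv (-cc) (gttBase.length : Int)))).toNat = 0 := by omega
    rw [hloop, hk]
    simp [slice_nil_to, List.replicate]
  · -- char_count > 0
    have h0 : (0:Int) < (gttBase.length : Int) := by exact_mod_cast gttBase_pos
    obtain ⟨⟨j, hj⟩, hlen⟩ := gttLoopA_spec cc []
    rw [List.nil_append] at hj
    set q : Int := -(PySem.Int.floordiv (-cc) (gttBase.length : Int)) with hqdef
    have hbr := (PySem.Int.neg_floordiv_neg_eq_iff_of_pos (a := cc) (b := (gttBase.length : Int)) (q := q) h0).mp rfl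
    have hqpos : 0 < q := by nlinarith [hbr.1, hbr.2]
    have hmax : max 0 q = q := by omega
    rw [hmax]
    rw [hj, PySem.List.slice_to _ (le_of_lt hcc), PySem.List.slice_to _ (le_of_lt hcc)]
    congr 1
    apply take_gttRep
    · have : cc ≤ (j : Int) * (gttBase.length : Int) := by
        rw [hj, gttRep_len] at hlen; exact_mod_cast hlen
      omega
    · have h2 : cc ≤ q * (gttBase.length : Int) := hbr.2
      have : cc ≤ (q.toNat : Int) * (gttBase.length : Int) := by
        rwa [Int.toNat_of_nonneg (le_of_lt hqpos)]
      omega
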